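-- pv_equiv track=rewrite | github.com/va64doman/codility | Challenges/furyRoad.py | scooterRoad
-- ===== SOURCE A (Python) =====
-- def cost(scooter, sand):
--     costs = [[20,30], [5,40]]
--     return costs[scooter][sand]
--     pass
--
-- def scooterRoad(R):
--     N = len(R)
--     foot = [0] * (N+1)
--     for i in range(N-1,-1,-1): foot[i] = foot[i+1] + cost(False, R[i] == 'S')
--     ans = foot[0]
--     c = 0
--     for i in range(N):
--         c += cost(True, R[i] == 'S')
--         ans = min(ans, c + foot[i+1])
--     return ans
--     pass
-- ===== SOURCE B (Python) =====
-- def scooterRoad(R):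
--     # total walking cost plus the minimum running scooter-minus-foot delta
--     foot_total = 0
--     delta = 0
--     min_delta = 0
--     for ch in R:
--         if ch == 'S':
--             foot_total += 30
--             delta += 10
--         else:
--             foot_total += 20
--             delta -= 15
--         min_delta = min(min_delta, delta)
--     return foot_total + min_delta
-- ===== Notes on version B (the rewrite author's own statement) =====
-- stated objective: faster
-- what changed: Replaced A's suffix walking-cost array plus prefix-scooter combine step by a single scalar pass tracking the total foot cost and the minimum running (scooter-foot) delta; no O(n) auxiliary array.
import Mathlib
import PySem

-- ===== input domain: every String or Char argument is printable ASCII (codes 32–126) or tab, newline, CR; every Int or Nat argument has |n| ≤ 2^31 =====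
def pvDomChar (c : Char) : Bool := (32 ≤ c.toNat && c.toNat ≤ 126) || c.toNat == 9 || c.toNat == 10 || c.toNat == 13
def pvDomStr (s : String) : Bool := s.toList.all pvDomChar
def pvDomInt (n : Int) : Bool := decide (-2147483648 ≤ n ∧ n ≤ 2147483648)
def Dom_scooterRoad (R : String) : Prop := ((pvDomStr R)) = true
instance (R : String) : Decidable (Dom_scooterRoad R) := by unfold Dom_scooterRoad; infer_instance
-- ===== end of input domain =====

-- Proved: the return values of A and B agree on all strings in Dom_scooterRoad.
-- B trades A's suffix-cost array for two running scalars (total foot cost, minimum scooter-foot delta).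

-- ===== PORT A =====
-- port of Python helper `cost` (bools index the 2x2 table as 0/1)
def costTbl (scooter sand : Bool) : Int :=
  let costs : List (List Int) := [[20, 30], [5, 40]]
  (costs.getD (if scooter then 1 else 0) []).getD (if sand then 1 else 0) 0

-- backward fill `foot[i] = foot[i+1] + cost(False, R[i]=='S')`, foot[N] = 0
def footA : List Char → List Int
  | [] => [0]
  | c :: cs =>
    let rest := footA cs
    (rest.headD 0 + costTbl false (c == 'S')) :: rest

-- forward loop: c += cost(True, ...); ans = min(ans, c + foot[i+1])
def loopA : List Char → List Int → Int → Int → Int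
  | [], _, _, ans => ans
  | ch :: cs, f, c, ans =>
    let c' := c + costTbl true (ch == 'S')
    let ans' := min ans (c' + f.headD 0)
    loopA cs f.tail c' ans'

def scooterRoad (R : String) : Int :=
  let l := R.toList
  let foot := footA l
  loopA l foot.tail 0 (foot.headD 0)

-- ===== PORT B =====
def loopB : List Char → Int → Int → Int → Int
  | [], footTotal, _, minDelta => footTotal + minDelta
  | ch :: cs, footTotal, delta, minDelta =>
    if ch == 'S' then
      loopB cs (footTotal + 30) (delta + 10) (min minDelta (delta + 10))
    else
      loopB cs (footTotal + 20) (delta - 15) (min minDelta (delta - 15))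

def scooterRoad_alt (R : String) : Int := loopB R.toList 0 0 0

-- ===== PRECONDITION & SPEC =====
def Spec_scooterRoad (R : String) (out : Int) : Prop := out = scooterRoad_alt R
instance (R : String) (out : Int) : Decidable (Spec_scooterRoad R out) := by unfold Spec_scooterRoad; infer_instance

-- ===== CLAIM (what is proved, stated in full; the proofs are below) =====
def Claim_equal_scooterRoad : Prop := ∀ (R : String), Dom_scooterRoad R → Spec_scooterRoad R (scooterRoad R)

-- ===== LEMMAS AND PROOFS =====

-- foot cost of the whole suffix
def footSum : List Char → Int
  | [] => 0
  | c :: cs => costTbl false (c == 'S') + footSum cs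

theorem costTbl_tt : costTbl true true = 40 := rfl
theorem costTbl_tf : costTbl true false = 5 := rfl
theorem costTbl_ft : costTbl false true = 30 := rfl
theorem costTbl_ff : costTbl false false = 20 := rfl

theorem footA_headD (l : List Char) : (footA l).headD 0 = footSum l := by
  induction l with
  | nil => rfl
  | cons c cs ih =>
    show (footA cs).headD 0 + costTbl false (c == 'S') = _
    rw [ih, footSum]
    ring

theorem loopA_eq_loopB (l : List Char) :
    ∀ (tot delta best : Int),
      loopA l (footA l).tail (tot + delta) (tot + footSum l + best) = loopB l tot delta best := by
  induction l with
  | nil => intro tot delta best; simp [loopA, loopB, footSum]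
  | cons c cs ih =>
    intro tot delta best
    rw [show (footA (c :: cs)).tail = footA cs from rfl]
    by_cases h : c = 'S'
    · have h' : (c == 'S') = true := by simp [h]
      simp only [loopA, loopB, footA_headD, footSum, h', if_true, costTbl_tt, costTbl_ft]
      have e1 : tot + delta + 40 = (tot + 30) + (delta + 10) := by ring
      rw [e1]
      have e2 : min (tot + (30 + footSum cs) + best) (tot + 30 + (delta + 10) + footSum cs)
          = (tot + 30) + footSum cs + min best (delta + 10) := by omega
      rw [e2]
      exact ih (tot + 30) (delta + 10) (min best (delta + 10))
    · have h' : (c == 'S') = false := by simp [h]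
      simp only [loopA, loopB, footA_headD, footSum, h', costTbl_tf, costTbl_ff]
      have e1 : tot + delta + 5 = (tot + 20) + (delta - 15) := by ring
      rw [e1]
      have e2 : min (tot + (20 + footSum cs) + best) (tot + 20 + (delta - 15) + footSum cs)
          = (tot + 20) + footSum cs + min best (delta - 15) := by omega
      rw [e2]
      exact ih (tot + 20) (delta - 15) (min best (delta - 15))

-- ===== VERDICT (by name: the statement is the Claim_ definition above) =====
theorem scooterRoad_spec : Claim_equal_scooterRoad := by
  intro R _
  unfold Spec_scooterRoad scooterRoad scooterRoad_alt
  show loopA R.toList (footA R.toList).tail 0 ((footA R.toList).headD 0) = loopB R.toList 0 0 0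
  have h0 : (footA R.toList).headD 0 = 0 + footSum R.toList + 0 := by
    rw [footA_headD]; ring
  rw [h0, show (0 : Int) = 0 + 0 from rfl]
  exact loopA_eq_loopB R.toList 0 0 0
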